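-- pv_equiv track=rewrite | github.com/daniel347x/workflowy-mcp-fixed | beacon_obtain_code_snippet.py | _sh_comment_block_span
-- ===== SOURCE A (Python) =====
-- from typing import Dict, Iterable, List, Optional, Tuple
--
-- def _sh_comment_block_span(
--     lines: List[str],
--     comment_line: int,
-- ) -> Optional[Tuple[int, int]]:
--     """Return (top, bottom) of the shell '#' comment block around a beacon."""
--
--     n = len(lines)
--     if comment_line <= 0 or comment_line > n:
--         return None
--
--     # Determine end of the beacon metadata block (first line containing ']')
--     j = int(comment_line)
--     block_end = comment_line
--     while j <= n:
--         raw = lines[j - 1].lstrip()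
--         if raw.startswith("#"):
--             body = raw.lstrip("#").lstrip()
--         else:
--             body = raw
--         if "]" in body:
--             block_end = j
--             break
--         j += 1
--
--     top: Optional[int] = None
--     bottom: Optional[int] = None
--
--     # ABOVE
--     j = comment_line - 1
--     while j >= 1:
--         raw = lines[j - 1].lstrip()
--         if not raw:
--             j -= 1
--             continue
--         if raw.startswith("#") and "@beacon" not in raw:
--             if top is None:
--                 top = j
--                 bottom = j
--             else:
--                 top = j
--             j -= 1
--             continue
--         break
--
--     # BELOW
--     j = block_end + 1
--     while j <= n:
--         raw = lines[j - 1].lstrip()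
--         if not raw:
--             j += 1
--             continue
--         if raw.startswith("#") and "@beacon" not in raw:
--             if top is None:
--                 top = j
--                 bottom = j
--             else:
--                 bottom = j
--             j += 1
--             continue
--         break
--
--     if top is None:
--         return None
--     if bottom is None:
--         bottom = top
--     return top, bottom
-- ===== SOURCE B (Python) =====
-- from typing import List, Optional, Tuple
--
--
-- def _is_other(s: str) -> bool:
--     r = s.lstrip()
--     return bool(r) and not (r.startswith("#") and "@beacon" not in r)
--
--
-- def _is_comment(s: str) -> bool:
--     r = s.lstrip()
--     return bool(r) and r.startswith("#") and "@beacon" not in r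
--
--
-- def _has_close(s: str) -> bool:
--     r = s.lstrip()
--     body = r.lstrip("#").lstrip() if r.startswith("#") else r
--     return "]" in body
--
--
-- def _sh_comment_block_span(lines: List[str], comment_line: int) -> Optional[Tuple[int, int]]:
--     n = len(lines)
--     if comment_line <= 0 or comment_line > n:
--         return None
--     block_end = next((j for j in range(comment_line, n + 1) if _has_close(lines[j - 1])), comment_line)
--     # barriers: the nearest non-blank non-comment line strictly above the beacon
--     # line and strictly below the metadata block end (0 / n+1 when absent)
--     u = max((j for j in range(1, comment_line) if _is_other(lines[j - 1])), default=0)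
--     v = min((j for j in range(block_end + 1, n + 1) if _is_other(lines[j - 1])), default=n + 1)
--     idxs = [j for j in range(u + 1, comment_line) if _is_comment(lines[j - 1])] \
--          + [j for j in range(block_end + 1, v) if _is_comment(lines[j - 1])]
--     if not idxs:
--         return None
--     return min(idxs), max(idxs)
-- ===== Notes on version B (the rewrite author's own statement) =====
-- stated objective: alternative
-- what changed: B has no stop-at-first-mismatch scans: it locates the nearest non-blank non-comment 'barrier' line above the beacon (max over a full-range generator) and below the block end (min), filters the comment lines strictly between the barriers, and returns (min, max) of that set, instead of A's two sentinel-state walking loops.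
import Mathlib
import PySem

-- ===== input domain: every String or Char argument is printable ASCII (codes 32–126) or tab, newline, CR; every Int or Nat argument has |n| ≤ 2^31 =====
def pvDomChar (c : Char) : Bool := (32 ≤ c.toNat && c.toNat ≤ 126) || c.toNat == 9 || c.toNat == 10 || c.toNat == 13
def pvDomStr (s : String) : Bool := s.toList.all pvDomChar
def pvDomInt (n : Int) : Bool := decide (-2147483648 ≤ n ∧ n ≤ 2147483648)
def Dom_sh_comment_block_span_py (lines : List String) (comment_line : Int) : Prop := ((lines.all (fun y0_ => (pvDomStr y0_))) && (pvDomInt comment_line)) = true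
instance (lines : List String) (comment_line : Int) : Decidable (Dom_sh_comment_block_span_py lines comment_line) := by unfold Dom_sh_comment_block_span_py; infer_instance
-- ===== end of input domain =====

-- B replaces A's two stop-at-first-mismatch sentinel scans by barrier positions (nearest
-- non-blank non-comment line above / below, via max / min over full ranges) plus a filter
-- of the comment lines between them, returning (min, max); objective: alternative.

-- ===== PORT A =====
-- Python raw.lstrip("#") for a single-char strip set: drop leading '#' characters (exact)
def pvA_lstripHash (s : String) : String := String.ofList (s.toList.dropWhile (fun c => c == '#'))

-- the 'while j <= n' search for the first line whose body contains ']' (fuel = n + 1 - j)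
def pvA_findEnd (lines : List String) (comment_line : Int) : Int → Nat → Int
  | _, 0 => comment_line
  | j, fuel+1 =>
    let raw := PySem.Str.lstrip (PySem.List.pyGetD lines (j-1) "")
    let body := if PySem.Str.startswith raw "#" then PySem.Str.lstrip (pvA_lstripHash raw) else raw
    if PySem.Str.isIn "]" body then j else pvA_findEnd lines comment_line (j+1) fuel

-- the ABOVE 'while j >= 1' loop (fuel = j)
def pvA_above (lines : List String) : Int → Nat → Option Int × Option Int → Option Int × Option Int
  | _, 0, st => st
  | j, fuel+1, (top, bottom) =>
    let raw := PySem.Str.lstrip (PySem.List.pyGetD lines (j-1) "")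
    if raw = "" then pvA_above lines (j-1) fuel (top, bottom)
    else if PySem.Str.startswith raw "#" && !(PySem.Str.isIn "@beacon" raw) then
      match top with
      | none => pvA_above lines (j-1) fuel (some j, some j)
      | some _ => pvA_above lines (j-1) fuel (some j, bottom)
    else (top, bottom)

-- the BELOW 'while j <= n' loop (fuel = n + 1 - j)
def pvA_below (lines : List String) : Int → Nat → Option Int × Option Int → Option Int × Option Int
  | _, 0, st => st
  | j, fuel+1, (top, bottom) =>
    let raw := PySem.Str.lstrip (PySem.List.pyGetD lines (j-1) "")
    if raw = "" then pvA_below lines (j+1) fuel (top, bottom)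
    else if PySem.Str.startswith raw "#" && !(PySem.Str.isIn "@beacon" raw) then
      match top with
      | none => pvA_below lines (j+1) fuel (some j, some j)
      | some _ => pvA_below lines (j+1) fuel (top, some j)
    else (top, bottom)

def sh_comment_block_span_py (lines : List String) (comment_line : Int) : Option (Int × Int) :=
  let n : Int := lines.length
  if comment_line ≤ 0 ∨ comment_line > n then none
  else
    let block_end := pvA_findEnd lines comment_line comment_line (n + 1 - comment_line).toNat
    let st := pvA_above lines (comment_line - 1) (comment_line - 1).toNat (none, none)
    let st2 := pvA_below lines (block_end + 1) (n - block_end).toNat st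
    match st2.1 with
    | none => none
    | some t => some (t, st2.2.getD t)

-- ===== PORT B =====
-- _is_other of Source B: non-blank and not a non-beacon '#' comment
def pvB_isOther (s : String) : Bool :=
  let r := PySem.Str.lstrip s
  !(r == "") && !(PySem.Str.startswith r "#" && !(PySem.Str.isIn "@beacon" r))

-- _is_comment of Source B
def pvB_isComment (s : String) : Bool :=
  let r := PySem.Str.lstrip s
  !(r == "") && (PySem.Str.startswith r "#" && !(PySem.Str.isIn "@beacon" r))

-- Python r.lstrip("#") for a single-char strip set: drop leading '#' characters (exact)
def pvB_lstripHash (s : String) : String := String.ofList (s.toList.dropWhile (fun c => c == '#'))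

-- _has_close of Source B
def pvB_hasClose (s : String) : Bool :=
  let r := PySem.Str.lstrip s
  let body := if PySem.Str.startswith r "#" then PySem.Str.lstrip (pvB_lstripHash r) else r
  PySem.Str.isIn "]" body

def sh_comment_block_span_py_alt (lines : List String) (comment_line : Int) : Option (Int × Int) :=
  let n : Int := lines.length
  if comment_line ≤ 0 ∨ comment_line > n then none
  else
    let block_end := ((PySem.List.pyRange comment_line (n+1) 1).find?
        (fun j => pvB_hasClose (PySem.List.pyGetD lines (j-1) ""))).getD comment_line
    let u := (PySem.List.max? ((PySem.List.pyRange 1 comment_line 1).filter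
        (fun j => pvB_isOther (PySem.List.pyGetD lines (j-1) ""))) (fun x => x)).getD 0
    let v := (PySem.List.min? ((PySem.List.pyRange (block_end+1) (n+1) 1).filter
        (fun j => pvB_isOther (PySem.List.pyGetD lines (j-1) ""))) (fun x => x)).getD (n+1)
    let idxs := ((PySem.List.pyRange (u+1) comment_line 1).filter
        (fun j => pvB_isComment (PySem.List.pyGetD lines (j-1) "")))
      ++ ((PySem.List.pyRange (block_end+1) v 1).filter
        (fun j => pvB_isComment (PySem.List.pyGetD lines (j-1) "")))
    if idxs = [] then none
    else match PySem.List.min? idxs (fun x => x), PySem.List.max? idxs (fun x => x) with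
      | some mn, some mx => some (mn, mx)
      | _, _ => none

-- ===== PRECONDITION & SPEC =====
def Spec_sh_comment_block_span_py (lines : List String) (comment_line : Int) (out : Option (Int × Int)) : Prop := out = sh_comment_block_span_py_alt lines comment_line
instance (lines : List String) (comment_line : Int) (out : Option (Int × Int)) : Decidable (Spec_sh_comment_block_span_py lines comment_line out) := by unfold Spec_sh_comment_block_span_py; infer_instance

-- ===== CLAIM (what is proved, stated in full; the proofs are below) =====
def Claim_equal_sh_comment_block_span_py : Prop := ∀ (lines : List String) (comment_line : Int), Dom_sh_comment_block_span_py lines comment_line → Spec_sh_comment_block_span_py lines comment_line (sh_comment_block_span_py lines comment_line)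

-- ===== LEMMAS AND PROOFS =====

-- proof-side classification of the line with 1-based index j: 0 = blank, 1 = comment, 2 = other
def pvTagAt (lines : List String) (j : Int) : Int :=
  let r := PySem.Str.lstrip (PySem.List.pyGetD lines (j-1) "")
  if r = "" then 0
  else if PySem.Str.startswith r "#" && !(PySem.Str.isIn "@beacon" r) then 1
  else 2

-- the indexed tag sequence scanned downward / upward from j (proof-side model of A's scans)
def pvPairsDown (lines : List String) : Int → Nat → List (Int × Int)
  | _, 0 => []
  | j, f+1 => (j, pvTagAt lines j) :: pvPairsDown lines (j-1) f

def pvPairsUp (lines : List String) : Int → Nat → List (Int × Int)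
  | _, 0 => []
  | j, f+1 => (j, pvTagAt lines j) :: pvPairsUp lines (j+1) f

-- collect indices tagged 1, stop at the first 2 (the shape of both of A's scans)
def pvB_collect : List (Int × Int) → List Int
  | [] => []
  | (idx, t) :: rest =>
    if t = 2 then []
    else if t = 1 then idx :: pvB_collect rest
    else pvB_collect rest

-- A's sentinel state updates, replayed over the collected index list
def pvStepDown : Option Int × Option Int → List Int → Option Int × Option Int
  | st, [] => st
  | (none, _), i :: l => pvStepDown (some i, some i) l
  | (some _, b), i :: l => pvStepDown (some i, b) l

def pvStepUp : Option Int × Option Int → List Int → Option Int × Option Int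
  | st, [] => st
  | (none, _), i :: l => pvStepUp (some i, some i) l
  | (some t, _), i :: l => pvStepUp (some t, some i) l

theorem pvTagAt_eq0 {lines : List String} {j : Int}
    (h0 : PySem.Str.lstrip (PySem.List.pyGetD lines (j-1) "") = "") : pvTagAt lines j = 0 := by
  unfold pvTagAt; rw [if_pos h0]

theorem pvTagAt_eq1 {lines : List String} {j : Int}
    (h0 : ¬ PySem.Str.lstrip (PySem.List.pyGetD lines (j-1) "") = "")
    (h1 : (PySem.Str.startswith (PySem.Str.lstrip (PySem.List.pyGetD lines (j-1) "")) "#"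
      && !(PySem.Str.isIn "@beacon" (PySem.Str.lstrip (PySem.List.pyGetD lines (j-1) "")))) = true) :
    pvTagAt lines j = 1 := by
  unfold pvTagAt; rw [if_neg h0, if_pos h1]

theorem pvTagAt_eq2 {lines : List String} {j : Int}
    (h0 : ¬ PySem.Str.lstrip (PySem.List.pyGetD lines (j-1) "") = "")
    (h1 : ¬ (PySem.Str.startswith (PySem.Str.lstrip (PySem.List.pyGetD lines (j-1) "")) "#"
      && !(PySem.Str.isIn "@beacon" (PySem.Str.lstrip (PySem.List.pyGetD lines (j-1) "")))) = true) :
    pvTagAt lines j = 2 := by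
  unfold pvTagAt; rw [if_neg h0, if_neg h1]

-- the B-port predicates, expressed through the classification
theorem pvB_isOther_iff (lines : List String) (j : Int) :
    pvB_isOther (PySem.List.pyGetD lines (j-1) "") = true ↔ pvTagAt lines j = 2 := by
  unfold pvB_isOther pvTagAt
  by_cases h0 : PySem.Str.lstrip (PySem.List.pyGetD lines (j-1) "") = ""
  · rw [if_pos h0, h0]
    simp
  · rw [if_neg h0]
    cases hbv : (PySem.Str.startswith (PySem.Str.lstrip (PySem.List.pyGetD lines (j-1) "")) "#"
        && !(PySem.Str.isIn "@beacon" (PySem.Str.lstrip (PySem.List.pyGetD lines (j-1) "")))) <;>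
      simp only [hbv] <;> simp [h0]

theorem pvB_isComment_iff (lines : List String) (j : Int) :
    pvB_isComment (PySem.List.pyGetD lines (j-1) "") = true ↔ pvTagAt lines j = 1 := by
  unfold pvB_isComment pvTagAt
  by_cases h0 : PySem.Str.lstrip (PySem.List.pyGetD lines (j-1) "") = ""
  · rw [if_pos h0, h0]
    simp
  · rw [if_neg h0]
    cases hbv : (PySem.Str.startswith (PySem.Str.lstrip (PySem.List.pyGetD lines (j-1) "")) "#"
        && !(PySem.Str.isIn "@beacon" (PySem.Str.lstrip (PySem.List.pyGetD lines (j-1) "")))) <;>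
      simp only [hbv] <;> simp [h0]

theorem pvA_above_succ (lines : List String) (j : Int) (fuel : Nat) (top bottom : Option Int) :
    pvA_above lines j (fuel+1) (top, bottom) =
      (if PySem.Str.lstrip (PySem.List.pyGetD lines (j-1) "") = "" then
        pvA_above lines (j-1) fuel (top, bottom)
      else if PySem.Str.startswith (PySem.Str.lstrip (PySem.List.pyGetD lines (j-1) "")) "#"
          && !(PySem.Str.isIn "@beacon" (PySem.Str.lstrip (PySem.List.pyGetD lines (j-1) ""))) then
        (match top with
         | none => pvA_above lines (j-1) fuel (some j, some j)
         | some _ => pvA_above lines (j-1) fuel (some j, bottom))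
      else (top, bottom)) := rfl

theorem pvA_above_eq_step (lines : List String) :
    ∀ (fuel : Nat) (j : Int) (st : Option Int × Option Int),
    pvA_above lines j fuel st = pvStepDown st (pvB_collect (pvPairsDown lines j fuel)) := by
  intro fuel
  induction fuel with
  | zero => intro j st; rfl
  | succ fuel ih =>
    intro j st
    obtain ⟨top, bottom⟩ := st
    rw [pvA_above_succ,
      show pvPairsDown lines j (fuel+1)
        = (j, pvTagAt lines j) :: pvPairsDown lines (j-1) fuel from rfl]
    by_cases h0 : PySem.Str.lstrip (PySem.List.pyGetD lines (j-1) "") = ""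
    · rw [if_pos h0, pvTagAt_eq0 h0,
        show pvB_collect ((j, (0:Int)) :: pvPairsDown lines (j-1) fuel)
          = pvB_collect (pvPairsDown lines (j-1) fuel) from rfl]
      exact ih (j-1) (top, bottom)
    · rw [if_neg h0]
      by_cases h1 : (PySem.Str.startswith (PySem.Str.lstrip (PySem.List.pyGetD lines (j-1) "")) "#"
          && !(PySem.Str.isIn "@beacon" (PySem.Str.lstrip (PySem.List.pyGetD lines (j-1) "")))) = true
      · rw [if_pos h1, pvTagAt_eq1 h0 h1,
          show pvB_collect ((j, (1:Int)) :: pvPairsDown lines (j-1) fuel)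
            = j :: pvB_collect (pvPairsDown lines (j-1) fuel) from rfl]
        cases top with
        | none => exact ih (j-1) (some j, some j)
        | some t => exact ih (j-1) (some j, bottom)
      · rw [if_neg h1, pvTagAt_eq2 h0 h1,
          show pvB_collect ((j, (2:Int)) :: pvPairsDown lines (j-1) fuel) = [] from rfl]
        rfl

theorem pvA_below_succ (lines : List String) (j : Int) (fuel : Nat) (top bottom : Option Int) :
    pvA_below lines j (fuel+1) (top, bottom) =
      (if PySem.Str.lstrip (PySem.List.pyGetD lines (j-1) "") = "" then
        pvA_below lines (j+1) fuel (top, bottom)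
      else if PySem.Str.startswith (PySem.Str.lstrip (PySem.List.pyGetD lines (j-1) "")) "#"
          && !(PySem.Str.isIn "@beacon" (PySem.Str.lstrip (PySem.List.pyGetD lines (j-1) ""))) then
        (match top with
         | none => pvA_below lines (j+1) fuel (some j, some j)
         | some _ => pvA_below lines (j+1) fuel (top, some j))
      else (top, bottom)) := rfl

theorem pvA_below_eq_step (lines : List String) :
    ∀ (fuel : Nat) (j : Int) (st : Option Int × Option Int),
    pvA_below lines j fuel st = pvStepUp st (pvB_collect (pvPairsUp lines j fuel)) := by
  intro fuel
  induction fuel with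
  | zero => intro j st; rfl
  | succ fuel ih =>
    intro j st
    obtain ⟨top, bottom⟩ := st
    rw [pvA_below_succ,
      show pvPairsUp lines j (fuel+1)
        = (j, pvTagAt lines j) :: pvPairsUp lines (j+1) fuel from rfl]
    by_cases h0 : PySem.Str.lstrip (PySem.List.pyGetD lines (j-1) "") = ""
    · rw [if_pos h0, pvTagAt_eq0 h0,
        show pvB_collect ((j, (0:Int)) :: pvPairsUp lines (j+1) fuel)
          = pvB_collect (pvPairsUp lines (j+1) fuel) from rfl]
      exact ih (j+1) (top, bottom)
    · rw [if_neg h0]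
      by_cases h1 : (PySem.Str.startswith (PySem.Str.lstrip (PySem.List.pyGetD lines (j-1) "")) "#"
          && !(PySem.Str.isIn "@beacon" (PySem.Str.lstrip (PySem.List.pyGetD lines (j-1) "")))) = true
      · rw [if_pos h1, pvTagAt_eq1 h0 h1,
          show pvB_collect ((j, (1:Int)) :: pvPairsUp lines (j+1) fuel)
            = j :: pvB_collect (pvPairsUp lines (j+1) fuel) from rfl]
        cases top with
        | none => exact ih (j+1) (some j, some j)
        | some t => exact ih (j+1) (some t, some j)
      · rw [if_neg h1, pvTagAt_eq2 h0 h1,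
          show pvB_collect ((j, (2:Int)) :: pvPairsUp lines (j+1) fuel) = [] from rfl]
        rfl

theorem pvA_findEnd_succ (lines : List String) (cl j : Int) (fuel : Nat) :
    pvA_findEnd lines cl j (fuel+1) =
      if pvB_hasClose (PySem.List.pyGetD lines (j-1) "") = true then j
      else pvA_findEnd lines cl (j+1) fuel := rfl

theorem pvA_findEnd_eq (lines : List String) (cl : Int) :
    ∀ (fuel : Nat) (j : Int), j + fuel = (lines.length : Int) + 1 →
    pvA_findEnd lines cl j fuel =
      ((PySem.List.pyRange j ((lines.length : Int)+1) 1).find?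
        (fun i => pvB_hasClose (PySem.List.pyGetD lines (i-1) ""))).getD cl := by
  intro fuel
  induction fuel with
  | zero =>
    intro j hj
    rw [PySem.List.pyRange_one_eq_nil (by omega)]
    rfl
  | succ fuel ih =>
    intro j hj
    rw [PySem.List.pyRange_one_cons (by push_cast at hj ⊢; omega), List.find?_cons]
    by_cases h : pvB_hasClose (PySem.List.pyGetD lines (j-1) "") = true
    · rw [pvA_findEnd_succ, if_pos h]
      simp [h]
    · have hb : pvB_hasClose (PySem.List.pyGetD lines (j-1) "") = false := by
        revert h; cases pvB_hasClose (PySem.List.pyGetD lines (j-1) "") <;> simp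
      rw [pvA_findEnd_succ, if_neg h]
      simp only [hb]
      exact ih (j+1) (by push_cast at hj ⊢; omega)

theorem pvA_findEnd_bounds (lines : List String) (cl : Int) (hcl : cl ≤ (lines.length : Int)) :
    ∀ (fuel : Nat) (j : Int), cl ≤ j → j + fuel = (lines.length : Int) + 1 →
    cl ≤ pvA_findEnd lines cl j fuel ∧ pvA_findEnd lines cl j fuel ≤ (lines.length : Int) := by
  intro fuel
  induction fuel with
  | zero => intro j _ _; exact ⟨le_rfl, hcl⟩
  | succ fuel ih =>
    intro j hj hlen
    rw [pvA_findEnd_succ]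
    by_cases h : pvB_hasClose (PySem.List.pyGetD lines (j-1) "") = true
    · rw [if_pos h]
      exact ⟨hj, by push_cast at hlen ⊢; omega⟩
    · rw [if_neg h]
      exact ih (j+1) (by omega) (by push_cast at hlen ⊢; omega)

-- membership characterisation of A's downward scan collection
theorem pvMemDown (lines : List String) :
    ∀ (f : Nat) (j i : Int),
    (i ∈ pvB_collect (pvPairsDown lines j f)) ↔
      (j - (f : Int) < i ∧ i ≤ j ∧ pvTagAt lines i = 1 ∧
        ∀ k, i < k → k ≤ j → pvTagAt lines k ≠ 2) := by
  intro f
  induction f with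
  | zero =>
    intro j i
    simp only [pvPairsDown, pvB_collect, List.not_mem_nil, false_iff]
    push_cast
    intro h
    omega
  | succ f ih =>
    intro j i
    rw [show pvPairsDown lines j (f+1) = (j, pvTagAt lines j) :: pvPairsDown lines (j-1) f from rfl,
      show pvB_collect ((j, pvTagAt lines j) :: pvPairsDown lines (j-1) f)
        = if pvTagAt lines j = 2 then [] else if pvTagAt lines j = 1 then
            j :: pvB_collect (pvPairsDown lines (j-1) f)
          else pvB_collect (pvPairsDown lines (j-1) f) from rfl]
    by_cases h2 : pvTagAt lines j = 2
    · rw [if_pos h2]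
      simp only [List.not_mem_nil, false_iff]
      rintro ⟨hlt, hle, htag, hall⟩
      rcases eq_or_lt_of_le hle with rfl | hlt'
      · rw [htag] at h2; omega
      · exact hall j hlt' le_rfl h2
    · rw [if_neg h2]
      by_cases h1 : pvTagAt lines j = 1
      · rw [if_pos h1, List.mem_cons, ih (j-1) i]
        constructor
        · rintro (rfl | ⟨hlt, hle, htag, hall⟩)
          · refine ⟨by push_cast; omega, le_rfl, h1, ?_⟩
            intro k hk1 hk2; omega
          · refine ⟨by push_cast at hlt ⊢; omega, by omega, htag, ?_⟩
            intro k hk1 hk2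
            rcases eq_or_lt_of_le hk2 with rfl | hk3
            · exact h2
            · exact hall k hk1 (by omega)
        · rintro ⟨hlt, hle, htag, hall⟩
          rcases eq_or_lt_of_le hle with rfl | hlt'
          · exact Or.inl rfl
          · exact Or.inr ⟨by push_cast at hlt ⊢; omega, by omega, htag,
              fun k hk1 hk2 => hall k hk1 (by omega)⟩
      · rw [if_neg h1, ih (j-1) i]
        constructor
        · rintro ⟨hlt, hle, htag, hall⟩
          refine ⟨by push_cast at hlt ⊢; omega, by omega, htag, ?_⟩
          intro k hk1 hk2
          rcases eq_or_lt_of_le hk2 with rfl | hk3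
          · exact h2
          · exact hall k hk1 (by omega)
        · rintro ⟨hlt, hle, htag, hall⟩
          have hij : i ≠ j := by rintro rfl; exact h1 htag
          exact ⟨by push_cast at hlt ⊢; omega, by omega, htag,
            fun k hk1 hk2 => hall k hk1 (by omega)⟩

-- membership characterisation of A's upward scan collection
theorem pvMemUp (lines : List String) :
    ∀ (f : Nat) (j i : Int),
    (i ∈ pvB_collect (pvPairsUp lines j f)) ↔
      (j ≤ i ∧ i < j + (f : Int) ∧ pvTagAt lines i = 1 ∧
        ∀ k, j ≤ k → k < i → pvTagAt lines k ≠ 2) := by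
  intro f
  induction f with
  | zero =>
    intro j i
    simp only [pvPairsUp, pvB_collect, List.not_mem_nil, false_iff]
    push_cast
    intro h
    omega
  | succ f ih =>
    intro j i
    rw [show pvPairsUp lines j (f+1) = (j, pvTagAt lines j) :: pvPairsUp lines (j+1) f from rfl,
      show pvB_collect ((j, pvTagAt lines j) :: pvPairsUp lines (j+1) f)
        = if pvTagAt lines j = 2 then [] else if pvTagAt lines j = 1 then
            j :: pvB_collect (pvPairsUp lines (j+1) f)
          else pvB_collect (pvPairsUp lines (j+1) f) from rfl]
    by_cases h2 : pvTagAt lines j = 2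
    · rw [if_pos h2]
      simp only [List.not_mem_nil, false_iff]
      rintro ⟨hle, hlt, htag, hall⟩
      rcases eq_or_lt_of_le hle with rfl | hlt'
      · rw [htag] at h2; omega
      · exact hall j le_rfl hlt' h2
    · rw [if_neg h2]
      by_cases h1 : pvTagAt lines j = 1
      · rw [if_pos h1, List.mem_cons, ih (j+1) i]
        constructor
        · rintro (rfl | ⟨hle, hlt, htag, hall⟩)
          · refine ⟨le_rfl, by push_cast; omega, h1, ?_⟩
            intro k hk1 hk2; omega
          · refine ⟨by omega, by push_cast at hlt ⊢; omega, htag, ?_⟩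
            intro k hk1 hk2
            rcases eq_or_lt_of_le hk1 with rfl | hk3
            · exact h2
            · exact hall k (by omega) hk2
        · rintro ⟨hle, hlt, htag, hall⟩
          rcases eq_or_lt_of_le hle with rfl | hlt'
          · exact Or.inl rfl
          · exact Or.inr ⟨by omega, by push_cast at hlt ⊢; omega, htag,
              fun k hk1 hk2 => hall k (by omega) hk2⟩
      · rw [if_neg h1, ih (j+1) i]
        constructor
        · rintro ⟨hle, hlt, htag, hall⟩
          refine ⟨by omega, by push_cast at hlt ⊢; omega, htag, ?_⟩
          intro k hk1 hk2
          rcases eq_or_lt_of_le hk1 with rfl | hk3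
          · exact h2
          · exact hall k (by omega) hk2
        · rintro ⟨hle, hlt, htag, hall⟩
          have hij : i ≠ j := by rintro rfl; exact h1 htag
          exact ⟨by omega, by push_cast at hlt ⊢; omega, htag,
            fun k hk1 hk2 => hall k (by omega) hk2⟩

-- descending / strictly sorted facts used by pvCombine
theorem pvDown_fst (lines : List String) :
    ∀ (f : Nat) (j : Int),
      (∀ i ∈ (pvPairsDown lines j f).map Prod.fst, i ≤ j) ∧
      ((pvPairsDown lines j f).map Prod.fst).Pairwise (fun a b => b < a) := by
  intro f
  induction f with
  | zero => intro j; simp [pvPairsDown]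
  | succ f ih =>
    intro j
    have ⟨ihb, ihp⟩ := ih (j - 1)
    constructor
    · intro i hi
      simp only [pvPairsDown, List.map_cons, List.mem_cons] at hi
      rcases hi with rfl | hi
      · omega
      · have := ihb i hi; omega
    · simp only [pvPairsDown, List.map_cons]
      refine List.pairwise_cons.2 ⟨?_, ihp⟩
      intro a ha
      have := ihb a ha; omega

theorem pvUp_fst (lines : List String) :
    ∀ (f : Nat) (j : Int),
      (∀ i ∈ (pvPairsUp lines j f).map Prod.fst, j ≤ i) ∧
      ((pvPairsUp lines j f).map Prod.fst).Pairwise (fun a b => a < b) := by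
  intro f
  induction f with
  | zero => intro j; simp [pvPairsUp]
  | succ f ih =>
    intro j
    have ⟨ihb, ihp⟩ := ih (j + 1)
    constructor
    · intro i hi
      simp only [pvPairsUp, List.map_cons, List.mem_cons] at hi
      rcases hi with rfl | hi
      · omega
      · have := ihb i hi; omega
    · simp only [pvPairsUp, List.map_cons]
      refine List.pairwise_cons.2 ⟨?_, ihp⟩
      intro a ha
      have := ihb a ha; omega

theorem pvCollect_sublist : ∀ (ps : List (Int × Int)),
    (pvB_collect ps).Sublist (ps.map Prod.fst) := by
  intro ps
  induction ps with
  | nil => simp [pvB_collect]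
  | cons p rest ih =>
    obtain ⟨idx, t⟩ := p
    show (pvB_collect ((idx, t) :: rest)).Sublist (idx :: rest.map Prod.fst)
    rw [show pvB_collect ((idx, t) :: rest)
        = if t = 2 then [] else if t = 1 then idx :: pvB_collect rest else pvB_collect rest from rfl]
    split_ifs with h2 h1
    · exact List.nil_sublist _
    · exact List.Sublist.cons₂ _ ih
    · exact List.Sublist.cons _ ih

theorem pvStepDown_some (t : Int) (b : Option Int) :
    ∀ (l : List Int), pvStepDown (some t, b) l = (some (l.getLastD t), b) := by
  intro l
  induction l generalizing t with
  | nil => simp [pvStepDown]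
  | cons i l ih =>
    rw [show pvStepDown (some t, b) (i :: l) = pvStepDown (some i, b) l from rfl, ih,
      List.getLastD_cons]

theorem pvStepUp_some (t : Int) :
    ∀ (l : List Int) (x : Int), pvStepUp (some t, some x) l = (some t, some (l.getLastD x)) := by
  intro l
  induction l with
  | nil => intro x; simp [pvStepUp]
  | cons i l ih =>
    intro x
    rw [show pvStepUp (some t, some x) (i :: l) = pvStepUp (some t, some i) l from rfl, ih,
      List.getLastD_cons]

-- in a strictly descending list, getLastD is a lower bound
theorem pvDesc_last_le : ∀ (xs : List Int) (x : Int),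
    (x :: xs).Pairwise (fun a b => b < a) → ∀ y ∈ x :: xs, xs.getLastD x ≤ y := by
  intro xs
  induction xs with
  | nil => intro x _ y hy; simp at hy; simp [hy]
  | cons z zs ih =>
    intro x h y hy
    have hzx : z < x := (List.pairwise_cons.1 h).1 z (by simp)
    have htail := (List.pairwise_cons.1 h).2
    rcases List.mem_cons.1 hy with rfl | hy'
    · have := ih z htail z (by simp)
      rw [List.getLastD_cons]
      omega
    · rw [List.getLastD_cons]
      exact ih z htail y hy'

-- in a strictly ascending list, getLastD is an upper bound
theorem pvAsc_le_last : ∀ (xs : List Int) (x : Int),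
    (x :: xs).Pairwise (fun a b => a < b) → ∀ y ∈ x :: xs, y ≤ xs.getLastD x := by
  intro xs
  induction xs with
  | nil => intro x _ y hy; simp at hy; simp [hy]
  | cons z zs ih =>
    intro x h y hy
    have hzx : x < z := (List.pairwise_cons.1 h).1 z (by simp)
    have htail := (List.pairwise_cons.1 h).2
    rcases List.mem_cons.1 hy with rfl | hy'
    · have := ih z htail z (by simp)
      rw [List.getLastD_cons]
      omega
    · rw [List.getLastD_cons]
      exact ih z htail y hy'

theorem pvMin?_eq (xs : List Int) (m : Int) (hm : m ∈ xs) (hall : ∀ y ∈ xs, m ≤ y) :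
    PySem.List.min? xs (fun x => x) = some m := by
  cases h : PySem.List.min? xs (fun x => x) with
  | none =>
    rw [PySem.List.min?_eq_none_iff] at h
    subst h; simp at hm
  | some m' =>
    have h1 := PySem.List.min?_isMin h m hm
    have h2 := hall m' (PySem.List.min?_mem h)
    exact congrArg some (le_antisymm h1 h2)

theorem pvMax?_eq (xs : List Int) (m : Int) (hm : m ∈ xs) (hall : ∀ y ∈ xs, y ≤ m) :
    PySem.List.max? xs (fun x => x) = some m := by
  cases h : PySem.List.max? xs (fun x => x) with
  | none =>
    rw [PySem.List.max?_eq_none_iff] at h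
    subst h; simp at hm
  | some m' =>
    have h1 := PySem.List.max?_isMax h m hm
    have h2 := hall m' (PySem.List.max?_mem h)
    exact congrArg some (le_antisymm h2 h1)

-- the sentinel replays agree with "min/max of the collected union"
theorem pvCombine (c be : Int) (hbe : c ≤ be) (L M : List Int)
    (hLb : ∀ i ∈ L, i ≤ c - 1) (hLp : L.Pairwise (fun a b => b < a))
    (hMb : ∀ i ∈ M, be + 1 ≤ i) (hMp : M.Pairwise (fun a b => a < b)) :
    (match (pvStepUp (pvStepDown (none, none) L) M).1 with
     | none => none
     | some t => some (t, (pvStepUp (pvStepDown (none, none) L) M).2.getD t))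
    = (if L ++ M = [] then (none : Option (Int × Int))
       else match PySem.List.min? (L ++ M) (fun x => x), PySem.List.max? (L ++ M) (fun x => x) with
         | some mn, some mx => some (mn, mx)
         | _, _ => none) := by
  rcases L with _ | ⟨l0, L'⟩
  · rcases M with _ | ⟨m0, M'⟩
    · rfl
    · rw [show pvStepDown (none, none) ([] : List Int) = (none, none) from rfl,
        show pvStepUp (none, none) (m0 :: M') = pvStepUp (some m0, some m0) M' from rfl,
        pvStepUp_some]
      have hmin : PySem.List.min? (([] : List Int) ++ m0 :: M') (fun x => x) = some m0 := by
        apply pvMin?_eq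
        · simp
        · intro y hy
          simp only [List.nil_append, List.mem_cons] at hy
          rcases hy with rfl | hy'
          · exact le_rfl
          · exact le_of_lt ((List.pairwise_cons.1 hMp).1 y hy')
      have hmax : PySem.List.max? (([] : List Int) ++ m0 :: M') (fun x => x)
          = some (M'.getLastD m0) := by
        apply pvMax?_eq
        · simpa using (List.getLastD_mem_cons : M'.getLastD m0 ∈ m0 :: M')
        · intro y hy
          simp only [List.nil_append] at hy
          exact pvAsc_le_last M' m0 hMp y hy
      rw [show (([] : List Int) ++ m0 :: M') = m0 :: M' from rfl] at hmin hmax ⊢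
      rw [if_neg (by simp), hmin, hmax]
      rfl
  · have hL0 : pvStepDown (none, none) (l0 :: L')
        = (some (L'.getLastD l0), some l0) := by
      rw [show pvStepDown (none, none) (l0 :: L') = pvStepDown (some l0, some l0) L' from rfl,
        pvStepDown_some]
    have hLlast : ∀ y ∈ l0 :: L', L'.getLastD l0 ≤ y := pvDesc_last_le L' l0 hLp
    have hLmem : L'.getLastD l0 ∈ l0 :: L' := List.getLastD_mem_cons
    have hLmax : ∀ y ∈ l0 :: L', y ≤ l0 := by
      intro y hy
      rcases List.mem_cons.1 hy with rfl | hy'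
      · exact le_rfl
      · exact le_of_lt ((List.pairwise_cons.1 hLp).1 y hy')
    rcases M with _ | ⟨m0, M'⟩
    · rw [hL0, show pvStepUp (some (L'.getLastD l0), some l0) ([] : List Int)
          = (some (L'.getLastD l0), some l0) from rfl]
      have hmin : PySem.List.min? (l0 :: L' ++ []) (fun x => x) = some (L'.getLastD l0) := by
        apply pvMin?_eq <;> simp only [List.append_nil]
        · exact hLmem
        · exact hLlast
      have hmax : PySem.List.max? (l0 :: L' ++ []) (fun x => x) = some l0 := by
        apply pvMax?_eq <;> simp only [List.append_nil]
        · simp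
        · exact hLmax
      rw [if_neg (by simp), hmin, hmax]
      rfl
    · rw [hL0, show pvStepUp (some (L'.getLastD l0), some l0) (m0 :: M')
          = pvStepUp (some (L'.getLastD l0), some m0) M' from rfl, pvStepUp_some]
      have hcross : ∀ x ∈ l0 :: L', ∀ y ∈ m0 :: M', x < y := by
        intro x hx y hy
        have h1 : x ≤ c - 1 := hLb x hx
        have h2 : be + 1 ≤ y := hMb y hy
        omega
      have hmin : PySem.List.min? (l0 :: L' ++ m0 :: M') (fun x => x)
          = some (L'.getLastD l0) := by
        apply pvMin?_eq
        · simp only [List.cons_append, List.mem_cons]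
          rcases List.mem_cons.1 hLmem with h | h
          · exact Or.inl h
          · exact Or.inr (List.mem_append.2 (Or.inl h))
        · intro y hy
          have hy2 : y ∈ l0 :: L' ∨ y ∈ m0 :: M' := by
            rcases (by simpa using hy : y = l0 ∨ y ∈ L' ∨ y = m0 ∨ y ∈ M') with h|h|h|h
            exacts [Or.inl (by simp [h]), Or.inl (List.mem_cons_of_mem _ h),
              Or.inr (by simp [h]), Or.inr (List.mem_cons_of_mem _ h)]
          rcases hy2 with hy' | hy'
          · exact hLlast y hy'
          · exact le_of_lt (hcross _ hLmem y hy')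
      have hmax : PySem.List.max? (l0 :: L' ++ m0 :: M') (fun x => x)
          = some (M'.getLastD m0) := by
        apply pvMax?_eq
        · simp only [List.cons_append, List.mem_cons]
          rcases List.mem_cons.1 (List.getLastD_mem_cons : M'.getLastD m0 ∈ m0 :: M') with h | h
          · exact Or.inr (List.mem_append.2 (Or.inr (by rw [h]; exact List.mem_cons_self ..)))
          · exact Or.inr (List.mem_append.2 (Or.inr (List.mem_cons_of_mem _ h)))
        · intro y hy
          have hy2 : y ∈ l0 :: L' ∨ y ∈ m0 :: M' := by
            rcases (by simpa using hy : y = l0 ∨ y ∈ L' ∨ y = m0 ∨ y ∈ M') with h|h|h|h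
            exacts [Or.inl (by simp [h]), Or.inl (List.mem_cons_of_mem _ h),
              Or.inr (by simp [h]), Or.inr (List.mem_cons_of_mem _ h)]
          rcases hy2 with hy' | hy'
          · exact le_of_lt (hcross y hy' _ (List.getLastD_mem_cons : M'.getLastD m0 ∈ m0 :: M'))
          · exact pvAsc_le_last M' m0 hMp y hy'
      rw [if_neg (by simp), hmin, hmax]
      rfl

-- "empty-or-min/max" depends only on membership
theorem pvMinMaxCongr (xs ys : List Int) (h : ∀ i, i ∈ xs ↔ i ∈ ys) :
    (if xs = [] then (none : Option (Int × Int))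
     else match PySem.List.min? xs (fun x => x), PySem.List.max? xs (fun x => x) with
       | some mn, some mx => some (mn, mx)
       | _, _ => none)
    = (if ys = [] then none
     else match PySem.List.min? ys (fun x => x), PySem.List.max? ys (fun x => x) with
       | some mn, some mx => some (mn, mx)
       | _, _ => none) := by
  by_cases hx : xs = []
  · have hy : ys = [] := by
      rw [List.eq_nil_iff_forall_not_mem]
      intro i hi
      exact (List.eq_nil_iff_forall_not_mem.1 hx i) ((h i).2 hi)
    rw [if_pos hx, if_pos hy]
  · have hy : ¬ ys = [] := by
      intro hy
      exact hx (List.eq_nil_iff_forall_not_mem.2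
        (fun i hi => List.eq_nil_iff_forall_not_mem.1 hy i ((h i).1 hi)))
    rw [if_neg hx, if_neg hy]
    obtain ⟨mn, hmn⟩ : ∃ mn, PySem.List.min? xs (fun x => x) = some mn := by
      cases hm : PySem.List.min? xs (fun x => x) with
      | none => exact absurd ((PySem.List.min?_eq_none_iff _ _).1 hm) hx
      | some m => exact ⟨m, rfl⟩
    obtain ⟨mx, hmx⟩ : ∃ mx, PySem.List.max? xs (fun x => x) = some mx := by
      cases hm : PySem.List.max? xs (fun x => x) with
      | none => exact absurd ((PySem.List.max?_eq_none_iff _ _).1 hm) hx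
      | some m => exact ⟨m, rfl⟩
    have hmn' : PySem.List.min? ys (fun x => x) = some mn :=
      pvMin?_eq ys mn ((h mn).1 (PySem.List.min?_mem hmn))
        (fun y hy' => PySem.List.min?_isMin hmn y ((h y).2 hy'))
    have hmx' : PySem.List.max? ys (fun x => x) = some mx :=
      pvMax?_eq ys mx ((h mx).1 (PySem.List.max?_mem hmx))
        (fun y hy' => PySem.List.max?_isMax hmx y ((h y).2 hy'))
    rw [hmn, hmx, hmn', hmx']

-- B's above-barrier filter has the same members as A's downward scan collection
theorem pvAboveMem (lines : List String) (c : Int) (hc : 1 ≤ c) (i : Int) :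
    (i ∈ (PySem.List.pyRange
        (((PySem.List.max? ((PySem.List.pyRange 1 c 1).filter
          (fun j => pvB_isOther (PySem.List.pyGetD lines (j-1) ""))) (fun x => x)).getD 0) + 1) c 1).filter
        (fun j => pvB_isComment (PySem.List.pyGetD lines (j-1) "")))
    ↔ i ∈ pvB_collect (pvPairsDown lines (c-1) (c-1).toNat) := by
  set F := (PySem.List.pyRange 1 c 1).filter
    (fun j => pvB_isOther (PySem.List.pyGetD lines (j-1) "")) with hF
  have hFmem : ∀ x, x ∈ F ↔ (1 ≤ x ∧ x < c ∧ pvTagAt lines x = 2) := by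
    intro x
    rw [hF, List.mem_filter, PySem.List.mem_pyRange_one, pvB_isOther_iff]
    tauto
  rw [List.mem_filter, PySem.List.mem_pyRange_one, pvMemDown lines (c-1).toNat (c-1) i,
    pvB_isComment_iff]
  have htn : ((c-1).toNat : Int) = c - 1 := by omega
  rw [htn]
  cases hFe : PySem.List.max? F (fun x => x) with
  | none =>
    have hFnil : F = [] := (PySem.List.max?_eq_none_iff _ _).1 hFe
    simp only [Option.getD_none]
    constructor
    · rintro ⟨⟨h1, h2⟩, h3⟩
      refine ⟨by omega, by omega, h3, ?_⟩
      intro k hk1 hk2 hk3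
      have : k ∈ F := (hFmem k).2 ⟨by omega, by omega, hk3⟩
      rw [hFnil] at this
      exact absurd this (List.not_mem_nil)
    · rintro ⟨h1, h2, h3, _⟩
      exact ⟨⟨by omega, by omega⟩, h3⟩
  | some m =>
    have hmF := PySem.List.max?_mem hFe
    have hmmax : ∀ y ∈ F, y ≤ m := fun y hy => PySem.List.max?_isMax hFe y hy
    obtain ⟨hm1, hm2, hm3⟩ := (hFmem m).1 hmF
    simp only [Option.getD_some]
    constructor
    · rintro ⟨⟨h1, h2⟩, h3⟩
      refine ⟨by omega, by omega, h3, ?_⟩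
      intro k hk1 hk2 hk3
      have hkF : k ∈ F := (hFmem k).2 ⟨by omega, by omega, hk3⟩
      have := hmmax k hkF
      omega
    · rintro ⟨h1, h2, h3, hall⟩
      have hmi : m < i := by
        rcases lt_trichotomy m i with h | h | h
        · exact h
        · rw [← h] at h3; rw [h3] at hm3; omega
        · exact absurd hm3 (hall m h (by omega))
      exact ⟨⟨by omega, by omega⟩, h3⟩

-- B's below-barrier filter has the same members as A's upward scan collection
theorem pvBelowMem (lines : List String) (be : Int) (hbe : be ≤ (lines.length : Int)) (i : Int) :
    (i ∈ (PySem.List.pyRange (be+1)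
        ((PySem.List.min? ((PySem.List.pyRange (be+1) ((lines.length : Int)+1) 1).filter
          (fun j => pvB_isOther (PySem.List.pyGetD lines (j-1) ""))) (fun x => x)).getD
            ((lines.length : Int)+1)) 1).filter
        (fun j => pvB_isComment (PySem.List.pyGetD lines (j-1) "")))
    ↔ i ∈ pvB_collect (pvPairsUp lines (be+1) ((lines.length : Int) - be).toNat) := by
  set G := (PySem.List.pyRange (be+1) ((lines.length : Int)+1) 1).filter
    (fun j => pvB_isOther (PySem.List.pyGetD lines (j-1) "")) with hG
  have hGmem : ∀ x, x ∈ G ↔ (be+1 ≤ x ∧ x < (lines.length : Int)+1 ∧ pvTagAt lines x = 2) := by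
    intro x
    rw [hG, List.mem_filter, PySem.List.mem_pyRange_one, pvB_isOther_iff]
    tauto
  rw [List.mem_filter, PySem.List.mem_pyRange_one,
    pvMemUp lines ((lines.length : Int) - be).toNat (be+1) i, pvB_isComment_iff]
  have htn : (((lines.length : Int) - be).toNat : Int) = (lines.length : Int) - be := by omega
  rw [htn]
  cases hGe : PySem.List.min? G (fun x => x) with
  | none =>
    have hGnil : G = [] := (PySem.List.min?_eq_none_iff _ _).1 hGe
    simp only [Option.getD_none]
    constructor
    · rintro ⟨⟨h1, h2⟩, h3⟩
      refine ⟨h1, by omega, h3, ?_⟩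
      intro k hk1 hk2 hk3
      have : k ∈ G := (hGmem k).2 ⟨hk1, by omega, hk3⟩
      rw [hGnil] at this
      exact absurd this (List.not_mem_nil)
    · rintro ⟨h1, h2, h3, _⟩
      exact ⟨⟨h1, by omega⟩, h3⟩
  | some m =>
    have hmG := PySem.List.min?_mem hGe
    have hmmin : ∀ y ∈ G, m ≤ y := fun y hy => PySem.List.min?_isMin hGe y hy
    obtain ⟨hm1, hm2, hm3⟩ := (hGmem m).1 hmG
    simp only [Option.getD_some]
    constructor
    · rintro ⟨⟨h1, h2⟩, h3⟩
      refine ⟨h1, by omega, h3, ?_⟩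
      intro k hk1 hk2 hk3
      have hkG : k ∈ G := (hGmem k).2 ⟨hk1, by omega, hk3⟩
      have := hmmin k hkG
      omega
    · rintro ⟨h1, h2, h3, hall⟩
      have him : i < m := by
        rcases lt_trichotomy i m with h | h | h
        · exact h
        · rw [h] at h3; rw [h3] at hm3; omega
        · exact absurd hm3 (hall m hm1 h)
      exact ⟨⟨h1, him⟩, h3⟩

-- ===== VERDICT (by name: the statement is the Claim_ definition above) =====
theorem sh_comment_block_span_py_spec : Claim_equal_sh_comment_block_span_py := by
  intro lines comment_line _
  unfold Spec_sh_comment_block_span_py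
  simp only [sh_comment_block_span_py, sh_comment_block_span_py_alt]
  by_cases hg : comment_line ≤ 0 ∨ comment_line > ((lines.length : Nat) : Int)
  · rw [if_pos hg, if_pos hg]
  · rw [if_neg hg, if_neg hg]
    have hc1 : 1 ≤ comment_line := by
      by_contra h; exact hg (Or.inl (by omega))
    have hcn : comment_line ≤ ((lines.length : Nat) : Int) := by
      by_contra h; exact hg (Or.inr (by omega))
    have hfe := pvA_findEnd_eq lines comment_line
      (((lines.length : Int) + 1 - comment_line).toNat) comment_line (by omega)
    rw [← hfe]
    have hbnd := pvA_findEnd_bounds lines comment_line hcn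
      (((lines.length : Int) + 1 - comment_line).toNat) comment_line le_rfl (by omega)
    set be := pvA_findEnd lines comment_line comment_line
      (((lines.length : Int) + 1 - comment_line).toNat) with hbe
    rw [pvA_above_eq_step, pvA_below_eq_step]
    set L := pvB_collect (pvPairsDown lines (comment_line - 1) (comment_line - 1).toNat) with hL
    set M := pvB_collect (pvPairsUp lines (be + 1) ((lines.length : Int) - be).toNat) with hM
    rw [pvCombine comment_line be (by omega) L M
      (fun i hi => by
        have := (pvDown_fst lines (comment_line - 1).toNat (comment_line - 1)).1 i
          ((pvCollect_sublist _).subset hi)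
        omega)
      (List.Pairwise.sublist (pvCollect_sublist _)
        (pvDown_fst lines (comment_line - 1).toNat (comment_line - 1)).2)
      (fun i hi => (pvUp_fst lines ((lines.length : Int) - be).toNat (be + 1)).1 i
        ((pvCollect_sublist _).subset hi))
      (List.Pairwise.sublist (pvCollect_sublist _)
        (pvUp_fst lines ((lines.length : Int) - be).toNat (be + 1)).2)]
    apply pvMinMaxCongr
    intro i
    rw [List.mem_append, List.mem_append, hL, hM,
      ← pvAboveMem lines comment_line hc1 i, ← pvBelowMem lines be (by omega) i]
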